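-- pv_equiv track=rewrite | github.com/n0thingNoob/CGRA-log-analyzer | timeseries_comparison.py | estimate_shift_by_activity
-- ===== SOURCE A (Python) =====
-- def estimate_shift_by_activity(trace_active, sim_active, lag_min=-200, lag_max=200):
--     """Find sim shift (in cycles) that maximizes trace-vs-sim activity correlation.
--
--     A positive return value means simulator cycles should be shifted later.
--     """
--     if not trace_active or not sim_active:
--         return 0
--
--     best_lag = 0
--     best_score = None
--     best_overlap = 0
--
--     for lag in range(lag_min, lag_max + 1):
--         score = 0
--         overlap = 0
--         for cycle, t_val in trace_active.items():
--             s_val = sim_active.get(cycle - lag, 0)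
--             if s_val > 0:
--                 overlap += 1
--                 score += t_val * s_val
--
--         if overlap < 8:
--             continue
--
--         candidate = (score, overlap)
--         if best_score is None or candidate > (best_score, best_overlap):
--             best_score = score
--             best_overlap = overlap
--             best_lag = lag
--
--     return best_lag
-- ===== SOURCE B (Python) =====
-- def _bisect_left(keys, x):
--     lo, hi = 0, len(keys)
--     while lo < hi:
--         mid = (lo + hi) // 2
--         if keys[mid] < x:
--             lo = mid + 1
--         else:
--             hi = mid
--     return lo
--
--
-- def estimate_shift_by_activity(trace_active, sim_active, lag_min=-200, lag_max=200):
--     """Find sim shift (in cycles) that maximizes trace-vs-sim activity correlation.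
--
--     One accumulation pass over the actual overlapping (trace, positive-sim) pairs:
--     positive sim entries are sorted by cycle once, each trace cycle binary-searches
--     its window of sim cycles, and every pair feeds its lag's (score, overlap)
--     accumulator; a final read-only sweep of the lag range picks the best lag.
--     """
--     if not trace_active or not sim_active:
--         return 0
--
--     spos = sorted([(c, v) for c, v in sim_active.items() if v > 0],
--                   key=lambda p: p[0])
--     keys = [c for c, _ in spos]
--
--     acc = {}
--     for t_cycle, t_val in trace_active.items():
--         i = _bisect_left(keys, t_cycle - lag_max)
--         hi_key = t_cycle - lag_min
--         while i < len(spos) and spos[i][0] <= hi_key: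
--             s_cycle, s_val = spos[i]
--             lag = t_cycle - s_cycle
--             sc, ov = acc.get(lag, (0, 0))
--             acc[lag] = (sc + t_val * s_val, ov + 1)
--             i += 1
--
--     best_lag = 0
--     best = None
--     for lag in range(lag_min, lag_max + 1):
--         sc, ov = acc.get(lag, (0, 0))
--         if ov >= 8 and (best is None or (sc, ov) > best):
--             best = (sc, ov)
--             best_lag = lag
--     return best_lag
-- ===== Notes on version B (the rewrite author's own statement) =====
-- stated objective: alternative
-- what changed: Instead of rescanning the whole trace map for every candidate lag, B sorts the positive sim entries by cycle once, binary-searches each trace cycle's window of sim cycles, accumulates each overlapping pair into its lag's (score, overlap) dict entry, and picks the best lag by a single read-only sweep of the lag range.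
import Mathlib
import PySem

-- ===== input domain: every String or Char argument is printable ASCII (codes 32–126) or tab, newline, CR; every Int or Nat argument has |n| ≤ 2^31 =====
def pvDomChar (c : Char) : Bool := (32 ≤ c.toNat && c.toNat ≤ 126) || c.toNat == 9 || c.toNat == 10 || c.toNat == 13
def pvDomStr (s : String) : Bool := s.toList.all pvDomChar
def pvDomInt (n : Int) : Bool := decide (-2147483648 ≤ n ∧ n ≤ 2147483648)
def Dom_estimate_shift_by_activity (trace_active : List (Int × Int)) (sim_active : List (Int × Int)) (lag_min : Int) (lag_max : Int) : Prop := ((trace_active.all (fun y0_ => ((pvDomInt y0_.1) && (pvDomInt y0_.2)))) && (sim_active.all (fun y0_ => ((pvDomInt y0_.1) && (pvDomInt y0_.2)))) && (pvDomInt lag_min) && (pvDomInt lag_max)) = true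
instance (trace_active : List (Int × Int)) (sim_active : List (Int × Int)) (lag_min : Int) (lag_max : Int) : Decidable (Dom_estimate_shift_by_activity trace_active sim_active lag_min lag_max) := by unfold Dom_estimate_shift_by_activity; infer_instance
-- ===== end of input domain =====

-- B replaces A's per-lag rescan of the whole trace by one accumulation pass over the
-- actual overlapping (trace, positive-sim) pairs, found by sorting the positive sim
-- cycles and binary-searching each trace cycle's window (objective: alternative).

-- ===== PORT A =====
-- inner loop body of A: s_val = sim_active.get(cycle - lag, 0); if s_val > 0: overlap/score update
def pvAStep (sim_active : List (Int × Int)) (lag : Int) (q : Int × Int) (cv : Int × Int) : Int × Int :=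
  let s_val := (PySem.Dict.mk sim_active).getD (cv.1 - lag) 0
  if s_val > 0 then (q.1 + cv.2 * s_val, q.2 + 1) else q

-- inner per-lag loop of A: 'for cycle, t_val in trace_active.items(): ...' giving (score, overlap)
def pvAInner (trace_active : List (Int × Int)) (sim_active : List (Int × Int)) (lag : Int) : Int × Int :=
  trace_active.foldl (pvAStep sim_active lag) (0, 0)

-- selection step shared by both ports: state = (best_lag, best_score?, best_overlap)
def pvSelStep (st : Int × Option Int × Int) (lag : Int) (score overlap : Int) : Int × Option Int × Int :=
  if overlap < 8 then st
  else
    match st.2.1 with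
    | none => (lag, some score, overlap)
    | some bs =>
      if score > bs ∨ (score = bs ∧ overlap > st.2.2) then (lag, some score, overlap) else st

def estimate_shift_by_activity (trace_active : List (Int × Int)) (sim_active : List (Int × Int)) (lag_min : Int) (lag_max : Int) : Int :=
  if trace_active = [] ∨ sim_active = [] then 0
  else
    ((PySem.List.pyRange lag_min (lag_max + 1) 1).foldl
      (fun st lag =>
        let inner := pvAInner trace_active sim_active lag
        pvSelStep st lag inner.1 inner.2)
      ((0 : Int), (none : Option Int), (0 : Int))).1

-- ===== PORT B =====
-- hand-written _bisect_left of Source B, step for step (keys[mid] read as getD: mid < hi ≤ len, so exact)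
def pvBisect (keys : List Int) (x : Int) (lo hi : Nat) : Nat :=
  if h : lo < hi then
    let mid := (lo + hi) / 2
    if keys.getD mid 0 < x then pvBisect keys x (mid + 1) hi else pvBisect keys x lo mid
  else lo
termination_by hi - lo
decreasing_by all_goals omega

-- body of B's inner while loop: one (trace, positive-sim) pair feeds its lag's accumulator
def pvBStep (cv : Int × Int) (acc : PySem.Dict Int (Int × Int)) (sv : Int × Int) : PySem.Dict Int (Int × Int) :=
  let lag := cv.1 - sv.1
  let p := acc.getD lag (0, 0)
  acc.insert lag (p.1 + cv.2 * sv.2, p.2 + 1)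

-- B's inner while loop: 'while i < len(spos) and spos[i][0] <= hi_key: ...; i += 1'
-- (spos[i] read as getD: the guard gives i < len, so exact)
def pvBWin (spos : List (Int × Int)) (cv : Int × Int) (hi_key : Int) (acc : PySem.Dict Int (Int × Int)) (i : Nat) : PySem.Dict Int (Int × Int) :=
  if h : i < spos.length ∧ (spos.getD i (0, 0)).1 ≤ hi_key then
    pvBWin spos cv hi_key (pvBStep cv acc (spos.getD i (0, 0))) (i + 1)
  else acc
termination_by spos.length - i
decreasing_by omega

-- positive sim entries sorted by cycle: sorted([... if v > 0], key=lambda p: p[0])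
def pvSpos (sim_active : List (Int × Int)) : List (Int × Int) :=
  PySem.List.sorted (sim_active.filter (fun sv => sv.2 > 0)) (fun p => p.1) false

-- per-pair accumulation dict of B: acc[lag] = (score, overlap)
def pvBAcc (trace_active : List (Int × Int)) (sim_active : List (Int × Int)) (lag_min : Int) (lag_max : Int) : PySem.Dict Int (Int × Int) :=
  let spos := pvSpos sim_active
  let keys := spos.map (·.1)
  trace_active.foldl
    (fun acc cv =>
      pvBWin spos cv (cv.1 - lag_min) acc (pvBisect keys (cv.1 - lag_max) 0 keys.length))
    PySem.Dict.empty

def estimate_shift_by_activity_alt (trace_active : List (Int × Int)) (sim_active : List (Int × Int)) (lag_min : Int) (lag_max : Int) : Int :=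
  if trace_active = [] ∨ sim_active = [] then 0
  else
    let acc := pvBAcc trace_active sim_active lag_min lag_max
    ((PySem.List.pyRange lag_min (lag_max + 1) 1).foldl
      (fun st lag =>
        let p := acc.getD lag (0, 0)
        pvSelStep st lag p.1 p.2)
      ((0 : Int), (none : Option Int), (0 : Int))).1

-- ===== PRECONDITION & SPEC =====
-- Pre_ requires the keys of each map to be pairwise distinct - guaranteed by
-- construction for the Python dicts A takes, so no returning input is excluded.
def Pre_estimate_shift_by_activity (trace_active : List (Int × Int)) (sim_active : List (Int × Int)) (lag_min : Int) (lag_max : Int) : Prop :=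
  (trace_active.map Prod.fst).Nodup ∧ (sim_active.map Prod.fst).Nodup

instance (trace_active : List (Int × Int)) (sim_active : List (Int × Int)) (lag_min : Int) (lag_max : Int) : Decidable (Pre_estimate_shift_by_activity trace_active sim_active lag_min lag_max) := by unfold Pre_estimate_shift_by_activity; infer_instance

def pvWitness_estimate_shift_by_activity : (List (Int × Int)) × (List (Int × Int)) × Int × Int :=
  ([(0, 1), (1, 2), (2, 1), (3, 1), (4, 2), (5, 1), (6, 1), (7, 3)],
   [(0, 1), (1, 1), (2, 2), (3, 1), (4, 1), (5, 2), (6, 1), (7, 1)], -3, 3)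

def Spec_estimate_shift_by_activity (trace_active : List (Int × Int)) (sim_active : List (Int × Int)) (lag_min : Int) (lag_max : Int) (out : Int) : Prop := out = estimate_shift_by_activity_alt trace_active sim_active lag_min lag_max
instance (trace_active : List (Int × Int)) (sim_active : List (Int × Int)) (lag_min : Int) (lag_max : Int) (out : Int) : Decidable (Spec_estimate_shift_by_activity trace_active sim_active lag_min lag_max out) := by unfold Spec_estimate_shift_by_activity; infer_instance

-- ===== CLAIM (what is proved, stated in full; the proofs are below) =====
def Claim_equal_estimate_shift_by_activity : Prop := ∀ (trace_active : List (Int × Int)) (sim_active : List (Int × Int)) (lag_min : Int) (lag_max : Int), Dom_estimate_shift_by_activity trace_active sim_active lag_min lag_max → Pre_estimate_shift_by_activity trace_active sim_active lag_min lag_max → Spec_estimate_shift_by_activity trace_active sim_active lag_min lag_max (estimate_shift_by_activity trace_active sim_active lag_min lag_max)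

-- ===== LEMMAS AND PROOFS =====

-- every index below the returned insertion point holds a key < x (sorted keys)
theorem pvBisect_lt (keys : List Int) (x : Int) (hs : keys.Pairwise (· ≤ ·)) :
    ∀ (n lo hi : Nat), hi - lo ≤ n → hi ≤ keys.length → (∀ i < lo, keys.getD i 0 < x) →
      ∀ i < pvBisect keys x lo hi, keys.getD i 0 < x := by
  have hmono : ∀ i j : Nat, i ≤ j → j < keys.length → keys.getD i 0 ≤ keys.getD j 0 := by
    intro i j hij hj
    rcases Nat.lt_or_ge i j with h | h
    · rw [List.getD_eq_getElem _ _ (by omega), List.getD_eq_getElem _ _ hj]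
      exact List.pairwise_iff_getElem.mp hs i j (by omega) hj h
    · have : i = j := by omega
      subst this; rfl
  intro n
  induction n with
  | zero =>
    intro lo hi hfuel hhi hinv i hi'
    rw [pvBisect] at hi'
    rw [dif_neg (by omega)] at hi'
    exact hinv i hi'
  | succ n ih =>
    intro lo hi hfuel hhi hinv i hi'
    rw [pvBisect] at hi'
    by_cases hlh : lo < hi
    · rw [dif_pos hlh] at hi'
      by_cases hm : keys.getD ((lo + hi) / 2) 0 < x
      · simp only [hm, if_pos] at hi'
        refine ih ((lo + hi) / 2 + 1) hi (by omega) hhi ?_ i hi'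
        intro k hk
        rcases Nat.lt_or_ge k lo with h | h
        · exact hinv k h
        · exact lt_of_le_of_lt (hmono k ((lo + hi) / 2) (by omega) (by omega)) hm
      · simp only [hm, if_neg, if_false] at hi'
        exact ih lo ((lo + hi) / 2) (by omega) (by omega) hinv i hi'
    · rw [dif_neg hlh] at hi'
      exact hinv i hi'

-- the while loop from index i is the fold over the window suffix
theorem pvBWin_eq_foldl (spos : List (Int × Int)) (cv : Int × Int) (hi_key : Int) :
    ∀ (n i : Nat) (acc : PySem.Dict Int (Int × Int)), spos.length - i ≤ n →
      pvBWin spos cv hi_key acc i =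
        ((spos.drop i).takeWhile (fun sv => decide (sv.1 ≤ hi_key))).foldl (pvBStep cv) acc := by
  intro n
  induction n with
  | zero =>
    intro i acc hfuel
    rw [pvBWin, dif_neg (fun hc => absurd hc.1 (by omega)),
      List.drop_eq_nil_of_le (by omega), List.takeWhile_nil, List.foldl_nil]
  | succ n ih =>
    intro i acc hfuel
    rw [pvBWin]
    by_cases hlt : i < spos.length
    · have hgd : spos.getD i (0, 0) = spos[i] := List.getD_eq_getElem _ _ hlt
      rw [List.drop_eq_getElem_cons hlt, List.takeWhile_cons]
      by_cases hc : (spos.getD i (0, 0)).1 ≤ hi_key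
      · rw [dif_pos ⟨hlt, hc⟩, ih (i + 1) _ (by omega), if_pos (by rw [← hgd]; simpa using hc),
          List.foldl_cons, hgd]
      · rw [dif_neg (fun hk => hc hk.2), if_neg (by rw [← hgd]; simpa using hc), List.foldl_nil]
    · rw [dif_neg (fun hc => hlt hc.1), List.drop_eq_nil_of_le (by omega), List.takeWhile_nil,
        List.foldl_nil]

-- entries whose key is not cycle - lag leave acc[lag] untouched
theorem pvFoldOther (cv : Int × Int) (lag : Int) (l : List (Int × Int)) :
    ∀ (acc : PySem.Dict Int (Int × Int)), (∀ sv ∈ l, cv.1 - sv.1 ≠ lag) →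
      (l.foldl (pvBStep cv) acc).getD lag (0, 0) = acc.getD lag (0, 0) := by
  induction l with
  | nil => intro acc _; rfl
  | cons sv t ih =>
    intro acc h
    rw [List.foldl_cons, ih _ (fun x hx => h x (List.mem_cons_of_mem _ hx))]
    simp only [pvBStep]
    rw [PySem.Dict.getD_insert, if_neg (fun hEq => h sv List.mem_cons_self (by omega))]

-- a member with key ≤ B survives takeWhile on a key-sorted list
theorem pvMemTakeWhile (B : Int) (l : List (Int × Int))
    (hp : l.Pairwise (fun a b => a.1 ≤ b.1)) (e : Int × Int) (he : e ∈ l) (hB : e.1 ≤ B) :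
    e ∈ l.takeWhile (fun sv => decide (sv.1 ≤ B)) := by
  induction l with
  | nil => cases he
  | cons a t ih =>
    rcases List.mem_cons.mp he with h | h
    · subst h
      rw [List.takeWhile_cons, if_pos (by simpa using hB)]
      exact List.mem_cons_self
    · have ha : a.1 ≤ B := le_trans ((List.pairwise_cons.mp hp).1 e h) hB
      rw [List.takeWhile_cons, if_pos (by simpa using ha)]
      exact List.mem_cons_of_mem _ (ih (List.pairwise_cons.mp hp).2 h)

-- one trace entry's windowed pass changes acc[lag] exactly by A's per-entry contribution
theorem pvWinStep (cv : Int × Int) (lag lag_min lag_max : Int)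
    (sim : List (Int × Int)) (acc : PySem.Dict Int (Int × Int))
    (hnd : (sim.map Prod.fst).Nodup) (h1 : lag_min ≤ lag) (h2 : lag ≤ lag_max) :
    (pvBWin (pvSpos sim) cv (cv.1 - lag_min) acc
        (pvBisect ((pvSpos sim).map (·.1)) (cv.1 - lag_max) 0 ((pvSpos sim).map (·.1)).length)).getD lag (0, 0) =
    (if (PySem.Dict.mk sim).getD (cv.1 - lag) 0 > 0 then
       ((acc.getD lag (0, 0)).1 + cv.2 * (PySem.Dict.mk sim).getD (cv.1 - lag) 0,
        (acc.getD lag (0, 0)).2 + 1)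
     else acc.getD lag (0, 0)) := by
  have hperm : (pvSpos sim).Perm (sim.filter (fun sv => sv.2 > 0)) :=
    PySem.List.sorted_perm _ _ _
  have hpair : (pvSpos sim).Pairwise (fun a b => a.1 ≤ b.1) :=
    PySem.List.sorted_pairwise _ _
  have hkpair : ((pvSpos sim).map (·.1)).Pairwise (· ≤ ·) :=
    List.pairwise_map.mpr hpair
  have hknodup : ((pvSpos sim).map (·.1)).Nodup := by
    refine (hperm.map _).nodup_iff.mpr ?_
    have h1 : ((sim.filter (fun sv => sv.2 > 0)).map (fun x : Int × Int => x.1)).Sublist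
        (sim.map (fun x : Int × Int => x.1)) := List.filter_sublist.map _
    exact h1.nodup (by simpa using hnd)
  rw [pvBWin_eq_foldl (pvSpos sim) cv (cv.1 - lag_min) (pvSpos sim).length _ _ (by omega)]
  by_cases hp : (PySem.Dict.mk sim).getD (cv.1 - lag) 0 > 0
  · rw [if_pos hp]
    -- the unique positive sim entry at key cv.1 - lag
    have hget : (PySem.Dict.mk sim).get? (cv.1 - lag) =
        some ((PySem.Dict.mk sim).getD (cv.1 - lag) 0) := by
      cases hq : (PySem.Dict.mk sim).get? (cv.1 - lag) with
      | none => rw [PySem.Dict.getD_eq_get?_getD, hq] at hp; simp at hp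
      | some v => rw [PySem.Dict.getD_eq_get?_getD, hq]; rfl
    have he_sim : (cv.1 - lag, (PySem.Dict.mk sim).getD (cv.1 - lag) 0) ∈ sim :=
      PySem.Dict.mem_items_of_get?_eq_some _ hget
    have he_spos : (cv.1 - lag, (PySem.Dict.mk sim).getD (cv.1 - lag) 0) ∈ pvSpos sim :=
      hperm.mem_iff.mpr (List.mem_filter.mpr ⟨he_sim, by simpa using hp⟩)
    obtain ⟨idx, hidx, hei⟩ := List.getElem_of_mem he_spos
    have hkey_idx : ((pvSpos sim).map (·.1)).getD idx 0 = cv.1 - lag := by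
      rw [List.getD_eq_getElem _ _ (by simpa using hidx)]
      simp [hei]
    have hj : pvBisect ((pvSpos sim).map (·.1)) (cv.1 - lag_max) 0 ((pvSpos sim).map (·.1)).length ≤ idx := by
      by_contra hltj
      have := pvBisect_lt ((pvSpos sim).map (·.1)) (cv.1 - lag_max) hkpair
        ((pvSpos sim).map (·.1)).length 0 ((pvSpos sim).map (·.1)).length
        (by omega) le_rfl (by omega) idx (by omega)
      rw [hkey_idx] at this
      omega
    set j := pvBisect ((pvSpos sim).map (·.1)) (cv.1 - lag_max) 0 ((pvSpos sim).map (·.1)).length with hjdef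
    have he_drop : (cv.1 - lag, (PySem.Dict.mk sim).getD (cv.1 - lag) 0) ∈ (pvSpos sim).drop j := by
      have hlen : idx - j < ((pvSpos sim).drop j).length := by
        rw [List.length_drop]; omega
      have h2 : ((pvSpos sim).drop j)[idx - j]'hlen = (pvSpos sim)[idx] := by
        rw [List.getElem_drop]
        congr 1
        omega
      exact (h2.trans hei) ▸ List.getElem_mem hlen
    have he_w : (cv.1 - lag, (PySem.Dict.mk sim).getD (cv.1 - lag) 0) ∈
        ((pvSpos sim).drop j).takeWhile (fun sv => decide (sv.1 ≤ cv.1 - lag_min)) :=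
      pvMemTakeWhile (cv.1 - lag_min) _ (hpair.drop) _ he_drop (by omega)
    obtain ⟨w1, w2, hw⟩ := List.append_of_mem he_w
    have hsubw : ((((pvSpos sim).drop j).takeWhile (fun sv => decide (sv.1 ≤ cv.1 - lag_min)))).Sublist (pvSpos sim) :=
      (List.takeWhile_sublist _).trans (List.drop_sublist _ _)
    have hwnd : ((((pvSpos sim).drop j).takeWhile (fun sv => decide (sv.1 ≤ cv.1 - lag_min))).map (·.1)).Nodup :=
      (hsubw.map _).nodup hknodup
    rw [hw] at hwnd
    simp only [List.map_append, List.map_cons] at hwnd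
    rcases List.nodup_append.mp hwnd with ⟨_, hn2, hdisj⟩
    have hW1 : ∀ x ∈ w1, cv.1 - x.1 ≠ lag := by
      intro x hx hEq
      exact hdisj x.1 (List.mem_map_of_mem hx) (cv.1 - lag) List.mem_cons_self (by omega)
    have hW2 : ∀ x ∈ w2, cv.1 - x.1 ≠ lag := by
      intro x hx hEq
      exact (List.nodup_cons.mp hn2).1 (by
        have : x.1 = cv.1 - lag := by omega
        exact this ▸ List.mem_map_of_mem hx)
    rw [hw, List.foldl_append, List.foldl_cons, pvFoldOther cv lag w2 _ hW2]
    simp only [pvBStep]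
    rw [show cv.1 - (cv.1 - lag) = lag by omega, PySem.Dict.getD_insert_self,
      pvFoldOther cv lag w1 _ hW1]
  · rw [if_neg hp]
    apply pvFoldOther
    intro x hx hEq
    have hx_spos : x ∈ pvSpos sim :=
      ((List.takeWhile_sublist _).trans (List.drop_sublist _ _)).mem hx
    rcases List.mem_filter.mp (hperm.mem_iff.mp hx_spos) with ⟨hx_sim, hx_pos⟩
    have hx1 : x.1 = cv.1 - lag := by omega
    have hget : (PySem.Dict.mk sim).get? x.1 = some x.2 :=
      PySem.Dict.get?_of_mem_items _ (by simpa using hx_sim) hnd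
    rw [PySem.Dict.getD_eq_get?_getD, ← hx1, hget] at hp
    simp at hp
    have : x.2 > 0 := by simpa using hx_pos
    omega

-- A's inner fold started from p just adds p componentwise
theorem pvAInnerAdd (sim : List (Int × Int)) (lag : Int) (t : List (Int × Int)) (p : Int × Int) :
    t.foldl (pvAStep sim lag) p = (p.1 + (pvAInner t sim lag).1, p.2 + (pvAInner t sim lag).2) := by
  induction t generalizing p with
  | nil => simp [pvAInner]
  | cons cv t ih =>
    rw [List.foldl_cons, ih (pvAStep sim lag p cv)]
    have : pvAInner (cv :: t) sim lag = t.foldl (pvAStep sim lag) (pvAStep sim lag (0, 0) cv) := rfl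
    rw [this, ih (pvAStep sim lag (0, 0) cv)]
    by_cases hs : (PySem.Dict.mk sim).getD (cv.1 - lag) 0 > 0
    · simp [pvAStep, hs, Prod.ext_iff]
      constructor <;> ring
    · simp [pvAStep, hs]

-- the accumulation dict holds exactly A's per-lag (score, overlap)
theorem pvAccSpec (trace sim : List (Int × Int)) (lag lag_min lag_max : Int)
    (d : PySem.Dict Int (Int × Int))
    (hnd : (sim.map Prod.fst).Nodup) (h1 : lag_min ≤ lag) (h2 : lag ≤ lag_max) :
    (trace.foldl
      (fun acc cv =>
        pvBWin (pvSpos sim) cv (cv.1 - lag_min) acc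
          (pvBisect ((pvSpos sim).map (·.1)) (cv.1 - lag_max) 0 ((pvSpos sim).map (·.1)).length))
      d).getD lag (0, 0) =
    ((d.getD lag (0, 0)).1 + (pvAInner trace sim lag).1,
     (d.getD lag (0, 0)).2 + (pvAInner trace sim lag).2) := by
  induction trace generalizing d with
  | nil => simp [pvAInner]
  | cons cv t ih =>
    rw [List.foldl_cons, ih _, pvWinStep cv lag lag_min lag_max sim d hnd h1 h2]
    have hA : pvAInner (cv :: t) sim lag = t.foldl (pvAStep sim lag) (pvAStep sim lag (0, 0) cv) := rfl
    rw [hA, pvAInnerAdd sim lag t (pvAStep sim lag (0, 0) cv)]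
    by_cases hs : (PySem.Dict.mk sim).getD (cv.1 - lag) 0 > 0
    · simp [pvAStep, hs, Prod.ext_iff]
      constructor <;> ring
    · simp [pvAStep, hs]

theorem pvBAccGetD (trace sim : List (Int × Int)) (lag lag_min lag_max : Int)
    (hnd : (sim.map Prod.fst).Nodup) (h1 : lag_min ≤ lag) (h2 : lag ≤ lag_max) :
    (pvBAcc trace sim lag_min lag_max).getD lag (0, 0) = pvAInner trace sim lag := by
  unfold pvBAcc
  rw [pvAccSpec trace sim lag lag_min lag_max PySem.Dict.empty hnd h1 h2]
  simp [PySem.Dict.getD_empty]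

-- ===== VERDICT (by name: the statement is the Claim_ definition above) =====
theorem estimate_shift_by_activity_spec : Claim_equal_estimate_shift_by_activity := by
  intro trace sim lag_min lag_max _ hpre
  unfold Spec_estimate_shift_by_activity estimate_shift_by_activity estimate_shift_by_activity_alt
  by_cases hnil : trace = [] ∨ sim = []
  · simp [hnil]
  · simp only [if_neg hnil]
    congr 1
    apply PySem.List.foldl_congr_mem
    intro st lag hmem
    rw [PySem.List.mem_pyRange_one] at hmem
    dsimp only
    rw [pvBAccGetD trace sim lag lag_min lag_max hpre.2 hmem.1 (by omega)]
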